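-- pv_equiv track=rewrite | github.com/Tianyi-Billy-Ma/N-MARS | src/n_mars/data/aug/hard_sample.py | hard_sample_augment
-- ===== SOURCE A (Python) =====
-- import difflib
--
-- def hard_sample_augment(
--     reference: list[int],
--     alternative: list[int],
--     undo_token_id: int,
-- ) -> tuple[list[int], list[int]]:
--     """Build a hard-sample augmented sequence from reference and alternative.
--
--     Computes maximal matching blocks between *reference* and *alternative*
--     (using :class:`difflib.SequenceMatcher`).  At each gap between matched
--     blocks, the alternative's tokens form the error span; the reference's
--     tokens at the same position form the correction.
--
--     The output sequence structure at each divergence region is::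
--
--         [matched_prefix] [alt_error_span] [<UNDO>×k] [ref_correction]
--
--     where ``k = max(len(alt_error_span), len(ref_correction))`` so that
--     the UNDO count covers the full error span length.
--
--     The mask is:
--     - 0 at ``alt_error_span`` positions (errors to be erased).
--     - 1 at all other positions (matched, UNDO, corrections).
--
--     If *reference* and *alternative* are identical, the function returns the
--     reference unchanged with an all-ones mask.
--
--     Args:
--         reference:      Token IDs of the gold reference sequence.
--         alternative:    Token IDs of the alternative (hard-error source) sequence.
--         undo_token_id:  Integer ID of the ``<UNDO>`` special token.
--
--     Returns:
--         A tuple ``(augmented_ids, mask)`` where: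
--         - ``augmented_ids``: token IDs of the augmented sequence.
--         - ``mask``: binary list; 0 at error positions, 1 everywhere else.
--     """
--     matcher = difflib.SequenceMatcher(None, reference, alternative, autojunk=False)
--     # opcodes: list of (tag, i1, i2, j1, j2)
--     # tags: 'equal', 'replace', 'insert', 'delete'
--     opcodes = matcher.get_opcodes()
--
--     augmented: list[int] = []
--     mask: list[int] = []
--
--     for tag, ref_i1, ref_i2, alt_j1, alt_j2 in opcodes:
--         if tag == "equal":
--             # Matched block — emit reference (== alternative) tokens, mask=1
--             chunk = reference[ref_i1:ref_i2]
--             augmented.extend(chunk)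
--             mask.extend([1] * len(chunk))
--
--         elif tag in ("replace", "insert", "delete"):
--             # Divergence: alternative tokens are the error, reference tokens
--             # are the correction.
--             alt_error = alternative[alt_j1:alt_j2]   # what the alt (wrong) model generated
--             ref_correction = reference[ref_i1:ref_i2] # what should be there
--
--             k_error = len(alt_error)
--             k_correction = len(ref_correction)
--
--             if k_error == 0 and k_correction == 0:
--                 continue
--
--             if k_error > 0:
--                 # Emit error span with mask=0
--                 augmented.extend(alt_error)
--                 mask.extend([0] * k_error)
--
--                 # Emit UNDO×k_error with mask=1
--                 augmented.extend([undo_token_id] * k_error)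
--                 mask.extend([1] * k_error)
--
--             if k_correction > 0:
--                 # Emit the reference correction with mask=1
--                 augmented.extend(ref_correction)
--                 mask.extend([1] * k_correction)
--
--     assert len(augmented) == len(mask), (
--         f"Length mismatch: augmented={len(augmented)}, mask={len(mask)}"
--     )
--     return augmented, mask
-- ===== SOURCE B (Python) =====
-- def hard_sample_augment(
--     reference: list[int],
--     alternative: list[int],
--     undo_token_id: int,
-- ) -> tuple[list[int], list[int]]:
--     """Table-driven rewrite.  Precompute once the run-length matrix
--     E[i][j] = length of the common run of reference/alternative ending at
--     (i, j); each region's longest matching block is then the leftmost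
--     argmax of the clamped table entries, recursed on both sides.
--     Adjacent blocks are merged, a (la, lb, 0) sentinel is appended, and the
--     output is emitted as labelled (tokens, mask_bit) pieces flattened at
--     the end."""
--     a, b = reference, alternative
--     la, lb = len(a), len(b)
--     E = []
--     prev = [0] * lb
--     for i in range(la):
--         ai = a[i]
--         row = [0] * lb
--         for j in range(lb):
--             if ai == b[j]:
--                 row[j] = prev[j - 1] + 1 if j else 1
--         E.append(row)
--         prev = row
--     def longest(alo, ahi, blo, bhi):
--         besti, bestj, bestk = alo, blo, 0
--         for i in range(alo, ahi):
--             row = E[i]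
--             cap_i = i - alo + 1
--             for j in range(blo, bhi):
--                 k = row[j]
--                 if k > cap_i:
--                     k = cap_i
--                 jj = j - blo + 1
--                 if k > jj:
--                     k = jj
--                 if k > bestk:
--                     besti, bestj, bestk = i + 1 - k, j + 1 - k, k
--         return besti, bestj, bestk
--     out = []
--     def rec(alo, ahi, blo, bhi):
--         i, j, k = longest(alo, ahi, blo, bhi)
--         if k:
--             rec(alo, i, blo, j)
--             out.append((i, j, k))
--             rec(i + k, ahi, j + k, bhi)
--     rec(0, la, 0, lb)
--     blocks = []
--     cur = None
--     for blk in out: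
--         if cur is not None and cur[0] + cur[2] == blk[0] and cur[1] + cur[2] == blk[1]:
--             cur = (cur[0], cur[1], cur[2] + blk[2])
--         else:
--             if cur is not None:
--                 blocks.append(cur)
--             cur = blk
--     if cur is not None:
--         blocks.append(cur)
--     blocks.append((la, lb, 0))
--     pieces = []
--     prev_i = prev_j = 0
--     for i, j, n in blocks:
--         alt_error = alternative[prev_j:j]
--         if alt_error:
--             pieces.append((alt_error, 0))
--             pieces.append(([undo_token_id] * len(alt_error), 1))
--         ref_correction = reference[prev_i:i]
--         if ref_correction:
--             pieces.append((ref_correction, 1))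
--         pieces.append((reference[i:i + n], 1))
--         prev_i, prev_j = i + n, j + n
--     augmented = [t for toks, _ in pieces for t in toks]
--     mask = [bit for toks, bit in pieces for _ in toks]
--     return augmented, mask
-- ===== Notes on version B (the rewrite author's own statement) =====
-- stated objective: alternative
-- what changed: B replaces both A's difflib call and its opcode/tag dispatch: it precomputes one global run-length matrix E[i][j] (common run ending at (i,j)) and finds each region's longest matching block as the leftmost argmax of the clamped table entries (no b2j index, no rolling j2len dicts, no extend-left/right loops), recurses unconditionally on both sides, merges adjacent blocks with a cur-accumulator, and emits labelled (tokens, mask_bit) pieces per block that are flattened into the two output lists at the end.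
import Mathlib
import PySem

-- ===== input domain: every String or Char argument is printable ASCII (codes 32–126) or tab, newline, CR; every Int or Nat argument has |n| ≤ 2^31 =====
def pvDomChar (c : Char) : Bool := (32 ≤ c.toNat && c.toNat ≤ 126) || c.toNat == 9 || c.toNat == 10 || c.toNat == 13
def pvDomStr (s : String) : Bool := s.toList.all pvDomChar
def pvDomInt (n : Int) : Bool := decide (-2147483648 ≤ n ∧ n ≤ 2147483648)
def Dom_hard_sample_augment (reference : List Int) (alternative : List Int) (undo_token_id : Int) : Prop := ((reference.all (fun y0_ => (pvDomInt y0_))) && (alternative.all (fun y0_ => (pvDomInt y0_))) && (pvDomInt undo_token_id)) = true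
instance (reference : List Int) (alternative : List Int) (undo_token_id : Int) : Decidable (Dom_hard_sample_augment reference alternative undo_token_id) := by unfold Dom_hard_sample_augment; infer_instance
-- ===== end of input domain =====

-- B replaces A's difflib matcher and opcode dispatch with a precomputed global run-length table whose
-- clamped leftmost argmax yields each region's longest block, plus a cursor/pieces emission (alternative; same cost).

-- ===== PORT A =====
-- Port of difflib.SequenceMatcher (isjunk=None, autojunk=False), called by A.
-- b2j: for j, x in enumerate(b): b2j.setdefault(x, []).append(j)   (no junk/popular removal)
def pvB2J (b : List Int) : PySem.Dict Int (List Nat) :=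
  (List.range b.length).foldl
    (fun d j => d.insert (b.getD j 0) (d.getD (b.getD j 0) [] ++ [j])) PySem.Dict.empty

-- inner loop of find_longest_match: 'for j in b2j.get(a[i], [])' with continue (j < blo) and break (j >= bhi).
-- j2len is keyed by Int so that the Python lookup j2len.get(j-1, 0) is exact also at j = 0 (key -1, absent).
def pvFlmInner (j2len : PySem.Dict Int Nat) (blo bhi i : Nat) :
    List Nat → PySem.Dict Int Nat → Nat × Nat × Nat → PySem.Dict Int Nat × (Nat × Nat × Nat)
  | [], newj2len, best => (newj2len, best)
  | j :: rest, newj2len, best =>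
    if j < blo then pvFlmInner j2len blo bhi i rest newj2len best
    else if bhi ≤ j then (newj2len, best)
    else
      let k := j2len.getD ((j : Int) - 1) 0 + 1
      let newj2len := newj2len.insert (j : Int) k
      let best := if k > best.2.2 then (i + 1 - k, j + 1 - k, k) else best
      pvFlmInner j2len blo bhi i rest newj2len best

-- 'while besti > alo and bestj > blo and a[besti-1] == b[bestj-1]' (fuel = besti: besti strictly decreases)
def pvExtLeft (a b : List Int) (alo blo : Nat) :
    Nat → Nat × Nat × Nat → Nat × Nat × Nat
  | 0, best => best
  | fuel + 1, (besti, bestj, bestsize) =>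
    if alo < besti ∧ blo < bestj ∧ a.getD (besti - 1) 0 = b.getD (bestj - 1) 0 then
      pvExtLeft a b alo blo fuel (besti - 1, bestj - 1, bestsize + 1)
    else (besti, bestj, bestsize)

-- 'while besti+bestsize < ahi and bestj+bestsize < bhi and a[besti+bestsize] == b[bestj+bestsize]' (fuel = ahi)
def pvExtRight (a b : List Int) (ahi bhi : Nat) :
    Nat → Nat × Nat × Nat → Nat × Nat × Nat
  | 0, best => best
  | fuel + 1, (besti, bestj, bestsize) =>
    if besti + bestsize < ahi ∧ bestj + bestsize < bhi ∧
        a.getD (besti + bestsize) 0 = b.getD (bestj + bestsize) 0 then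
      pvExtRight a b ahi bhi fuel (besti, bestj, bestsize + 1)
    else (besti, bestj, bestsize)

-- find_longest_match; the two junk-extension while-loops are omitted: their condition contains
-- isbjunk(...) which is constantly False here (isjunk=None, autojunk=False ⇒ bjunk is empty).
def pvFindLongestMatch (a b : List Int) (b2j : PySem.Dict Int (List Nat))
    (alo ahi blo bhi : Nat) : Nat × Nat × Nat :=
  let st :=
    (List.range' alo (ahi - alo)).foldl
      (fun (st : PySem.Dict Int Nat × (Nat × Nat × Nat)) i =>
        pvFlmInner st.1 blo bhi i (b2j.getD (a.getD i 0) []) PySem.Dict.empty st.2)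
      (PySem.Dict.empty, (alo, blo, 0))
  let best := pvExtLeft a b alo blo st.2.1 st.2
  pvExtRight a b ahi bhi ahi best

-- get_matching_blocks' queue recursion, written in-order (difflib sorts the collected blocks at the
-- end; in-order recursion over the same regions produces exactly that sorted list). fuel bounds depth.
def pvMBGo (a b : List Int) (b2j : PySem.Dict Int (List Nat)) :
    Nat → Nat → Nat → Nat → Nat → List (Nat × Nat × Nat)
  | 0, _, _, _, _ => []
  | fuel + 1, alo, ahi, blo, bhi =>
    let m := pvFindLongestMatch a b b2j alo ahi blo bhi
    if m.2.2 = 0 then []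
    else
      (if alo < m.1 ∧ blo < m.2.1 then pvMBGo a b b2j fuel alo m.1 blo m.2.1 else []) ++
      m ::
      (if m.1 + m.2.2 < ahi ∧ m.2.1 + m.2.2 < bhi then
        pvMBGo a b b2j fuel (m.1 + m.2.2) ahi (m.2.1 + m.2.2) bhi else [])

-- collapse adjacent equal blocks (state (i1, j1, k1), starting at (0,0,0))
def pvCollapse : List (Nat × Nat × Nat) → Nat × Nat × Nat → List (Nat × Nat × Nat)
  | [], (i1, j1, k1) => if k1 ≠ 0 then [(i1, j1, k1)] else []
  | (i2, j2, k2) :: rest, (i1, j1, k1) =>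
    if i1 + k1 = i2 ∧ j1 + k1 = j2 then pvCollapse rest (i1, j1, k1 + k2)
    else if k1 ≠ 0 then (i1, j1, k1) :: pvCollapse rest (i2, j2, k2)
    else pvCollapse rest (i2, j2, k2)

-- matcher.get_matching_blocks()
def pvMatchingBlocks (a b : List Int) : List (Nat × Nat × Nat) :=
  pvCollapse (pvMBGo a b (pvB2J b) (a.length + b.length + 1) 0 a.length 0 b.length) (0, 0, 0)
    ++ [(a.length, b.length, 0)]

-- get_opcodes(): derived from the matching blocks exactly as difflib does
def pvOpcodes : List (Nat × Nat × Nat) → Nat → Nat → List (String × Nat × Nat × Nat × Nat)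
  | [], _, _ => []
  | (ai, bj, size) :: rest, i, j =>
    (if i < ai ∧ j < bj then [("replace", i, ai, j, bj)]
     else if i < ai then [("delete", i, ai, j, bj)]
     else if j < bj then [("insert", i, ai, j, bj)]
     else []) ++
    (if size ≠ 0 then [("equal", ai, ai + size, bj, bj + size)] else []) ++
    pvOpcodes rest (ai + size) (bj + size)

-- A's loop over the opcodes, carrying (augmented, mask)
def pvAEmit (reference alternative : List Int) (undo_token_id : Int) :
    List (String × Nat × Nat × Nat × Nat) → List Int × List Int → List Int × List Int
  | [], st => st
  | (tag, i1, i2, j1, j2) :: rest, (aug, mask) =>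
    if tag = "equal" then
      let chunk := PySem.List.slice reference (some (i1 : Int)) (some (i2 : Int))
      pvAEmit reference alternative undo_token_id rest
        (aug ++ chunk, mask ++ List.replicate chunk.length 1)
    else if tag = "replace" ∨ tag = "insert" ∨ tag = "delete" then
      let alt_error := PySem.List.slice alternative (some (j1 : Int)) (some (j2 : Int))
      let ref_correction := PySem.List.slice reference (some (i1 : Int)) (some (i2 : Int))
      let k_error := alt_error.length
      let k_correction := ref_correction.length
      if k_error = 0 ∧ k_correction = 0 then
        pvAEmit reference alternative undo_token_id rest (aug, mask)
      else
        let st1 :=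
          if k_error > 0 then
            (aug ++ alt_error ++ List.replicate k_error undo_token_id,
             mask ++ List.replicate k_error 0 ++ List.replicate k_error 1)
          else (aug, mask)
        let st2 :=
          if k_correction > 0 then
            (st1.1 ++ ref_correction, st1.2 ++ List.replicate k_correction 1)
          else st1
        pvAEmit reference alternative undo_token_id rest st2
    else pvAEmit reference alternative undo_token_id rest (aug, mask)

def hard_sample_augment (reference : List Int) (alternative : List Int) (undo_token_id : Int) : List Int × List Int :=
  pvAEmit reference alternative undo_token_id
    (pvOpcodes (pvMatchingBlocks reference alternative) 0 0) ([], [])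

-- ===== PORT B =====
-- one row of the run-length matrix: row[j] = prev[j-1]+1 if j else 1, at matching cells
def pvRowB (a b : List Int) (i : Nat) (prev : List Nat) : List Nat :=
  (List.range b.length).map (fun j =>
    if a.getD i 0 = b.getD j 0 then (if j = 0 then 1 else prev.getD (j - 1) 0 + 1) else 0)

-- E built row by row (state: rows so far, previous row)
def pvTableB (a b : List Int) : List (List Nat) :=
  ((List.range a.length).foldl
    (fun (st : List (List Nat) × List Nat) i =>
      let row := pvRowB a b i st.2
      (st.1 ++ [row], row))
    ([], List.replicate b.length 0)).1

-- longest(alo, ahi, blo, bhi): leftmost argmax of the clamped table entries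
def pvLongestB (E : List (List Nat)) (alo ahi blo bhi : Nat) : Nat × Nat × Nat :=
  (List.range' alo (ahi - alo)).foldl
    (fun best i =>
      (List.range' blo (bhi - blo)).foldl
        (fun (best : Nat × Nat × Nat) j =>
          let k := min (min ((E.getD i []).getD j 0) (i - alo + 1)) (j - blo + 1)
          if k > best.2.2 then (i + 1 - k, j + 1 - k, k) else best)
        best)
    (alo, blo, 0)

-- rec(alo, ahi, blo, bhi): unconditional two-sided recursion (fuel bounds depth)
def pvRecB (E : List (List Nat)) : Nat → Nat → Nat → Nat → Nat → List (Nat × Nat × Nat)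
  | 0, _, _, _, _ => []
  | fuel + 1, alo, ahi, blo, bhi =>
    let m := pvLongestB E alo ahi blo bhi
    if m.2.2 = 0 then []
    else
      pvRecB E fuel alo m.1 blo m.2.1 ++ m ::
        pvRecB E fuel (m.1 + m.2.2) ahi (m.2.1 + m.2.2) bhi

-- merge adjacent runs with a cur-accumulator (cur = None initially)
def pvMergeB : List (Nat × Nat × Nat) → Option (Nat × Nat × Nat) → List (Nat × Nat × Nat)
  | [], none => []
  | [], some c => [c]
  | blk :: rest, none => pvMergeB rest (some blk)
  | blk :: rest, some c =>
    if c.1 + c.2.2 = blk.1 ∧ c.2.1 + c.2.2 = blk.2.1 then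
      pvMergeB rest (some (c.1, c.2.1, c.2.2 + blk.2.2))
    else c :: pvMergeB rest (some blk)

-- B's cursor walk: collect labelled (tokens, mask_bit) pieces per block
def pvPieces (reference alternative : List Int) (undo_token_id : Int) :
    List (Nat × Nat × Nat) → Nat → Nat → List (List Int × Int)
  | [], _, _ => []
  | (i, j, n) :: rest, prev_i, prev_j =>
    let alt_error := PySem.List.slice alternative (some (prev_j : Int)) (some (j : Int))
    let ref_correction := PySem.List.slice reference (some (prev_i : Int)) (some (i : Int))
    (if alt_error ≠ [] then
      [(alt_error, 0), (List.replicate alt_error.length undo_token_id, 1)] else []) ++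
    (if ref_correction ≠ [] then [(ref_correction, 1)] else []) ++
    (PySem.List.slice reference (some (i : Int)) (some ((i + n : Nat) : Int)), 1) ::
    pvPieces reference alternative undo_token_id rest (i + n) (j + n)

-- the two final flattening comprehensions
def hard_sample_augment_alt (reference : List Int) (alternative : List Int) (undo_token_id : Int) : List Int × List Int :=
  let E := pvTableB reference alternative
  let blocks :=
    pvMergeB
      (pvRecB E (reference.length + alternative.length + 1)
        0 reference.length 0 alternative.length) none
    ++ [(reference.length, alternative.length, 0)]
  let pieces := pvPieces reference alternative undo_token_id blocks 0 0
  (pieces.flatMap (fun p => p.1), pieces.flatMap (fun p => p.1.map (fun _ => p.2)))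

-- ===== PRECONDITION & SPEC =====
def Spec_hard_sample_augment (reference : List Int) (alternative : List Int) (undo_token_id : Int) (out : List Int × List Int) : Prop := out = hard_sample_augment_alt reference alternative undo_token_id
instance (reference : List Int) (alternative : List Int) (undo_token_id : Int) (out : List Int × List Int) : Decidable (Spec_hard_sample_augment reference alternative undo_token_id out) := by unfold Spec_hard_sample_augment; infer_instance

-- ===== CLAIM (what is proved, stated in full; the proofs are below) =====
def Claim_equal_hard_sample_augment : Prop := ∀ (reference : List Int) (alternative : List Int) (undo_token_id : Int), Dom_hard_sample_augment reference alternative undo_token_id → Spec_hard_sample_augment reference alternative undo_token_id (hard_sample_augment reference alternative undo_token_id)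

-- ===== LEMMAS AND PROOFS =====

-- mathematical value of the run-length table: length of the common run of a, b ending at (i, j)
def pvESpec (a b : List Int) (i j : Nat) : Nat :=
  if i < a.length ∧ j < b.length ∧ a.getD i 0 = b.getD j 0 then
    (if i = 0 ∨ j = 0 then 1 else pvESpec a b (i - 1) (j - 1) + 1)
  else 0
termination_by i
decreasing_by omega

-- clamped cell value used by both sides at cell (i, j) of a region starting at (alo, blo)
def pvCellK (a b : List Int) (alo blo i j : Nat) : Nat :=
  min (min (pvESpec a b i j) (i - alo + 1)) (j - blo + 1)

theorem pvESpec_pos (a b : List Int) (i j : Nat) :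
    0 < pvESpec a b i j ↔ (i < a.length ∧ j < b.length ∧ a.getD i 0 = b.getD j 0) := by
  rw [pvESpec]
  split_ifs with h h2
  · exact iff_of_true one_pos h
  · exact iff_of_true (Nat.succ_pos _) h
  · exact iff_of_false (lt_irrefl 0) h

theorem pvESpec_mismatch (a b : List Int) (i j k : Nat) (hk : pvESpec a b i j = k)
    (h0 : 0 < k) (hi : k ≤ i) (hj : k ≤ j) :
    a.getD (i - k) 0 ≠ b.getD (j - k) 0 := by
  induction k generalizing i j with
  | zero => omega
  | succ n ih =>
    rw [pvESpec] at hk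
    split_ifs at hk with h1 h2
    · omega
    · by_cases hn : n = 0
      · subst hn
        have h3 : pvESpec a b (i - 1) (j - 1) = 0 := by omega
        intro hEq
        have h4 : 0 < pvESpec a b (i - 1) (j - 1) := by
          rw [pvESpec_pos]
          refine ⟨by omega, by omega, ?_⟩
          have e1 : i - (0 + 1) = i - 1 := by omega
          have e2 : j - (0 + 1) = j - 1 := by omega
          rw [e1, e2] at hEq
          exact hEq
        omega
      · have h3 : pvESpec a b (i - 1) (j - 1) = n := by omega
        have hrec := ih (i - 1) (j - 1) h3 (by omega) (by omega) (by omega)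
        have e1 : i - 1 - n = i - (n + 1) := by omega
        have e2 : j - 1 - n = j - (n + 1) := by omega
        rwa [e1, e2] at hrec

-- getD of a mapped range
theorem pvGetD_map_range {α : Type} (f : Nat → α) (n j : Nat) (d : α) :
    ((List.range n).map f).getD j d = if j < n then f j else d := by
  rcases Nat.lt_or_ge j n with h | h
  · simp [List.getD_eq_getElem?_getD, List.getElem?_range, h]
  · have hlen : ((List.range n).map f).length ≤ j := by simpa using h
    simp [List.getD_eq_getElem?_getD, List.getElem?_eq_none hlen, Nat.not_lt.2 h]

-- one row of the table is the spec row
theorem pvRowB_correct (a b : List Int) (n : Nat) (hn : n < a.length) :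
    pvRowB a b n (if n = 0 then List.replicate b.length 0
        else (List.range b.length).map (fun j => pvESpec a b (n - 1) j)) =
      (List.range b.length).map (fun j => pvESpec a b n j) := by
  unfold pvRowB
  apply List.map_congr_left
  intro j hj
  rw [List.mem_range] at hj
  by_cases hm : a.getD n 0 = b.getD j 0
  · rw [if_pos hm, pvESpec,
      if_pos (show n < a.length ∧ j < b.length ∧ a.getD n 0 = b.getD j 0 from ⟨hn, hj, hm⟩)]
    by_cases hj0 : j = 0
    · rw [if_pos hj0, if_pos (Or.inr hj0)]
    · rw [if_neg hj0]
      by_cases hn0 : n = 0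
      · rw [if_pos hn0, if_pos (Or.inl hn0)]
        rw [List.getD_eq_getElem?_getD]
        simp [List.getElem?_replicate]
        split_ifs <;> rfl
      · rw [if_neg hn0, if_neg (by tauto)]
        rw [pvGetD_map_range, if_pos (by omega)]
  · rw [if_neg hm, pvESpec, if_neg (by tauto)]

-- the table is the mapped spec
theorem pvTableB_eq (a b : List Int) :
    pvTableB a b = (List.range a.length).map
      (fun i => (List.range b.length).map (fun j => pvESpec a b i j)) := by
  unfold pvTableB
  suffices h : ∀ n, n ≤ a.length →
      (List.range n).foldl
        (fun (st : List (List Nat) × List Nat) i =>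
          let row := pvRowB a b i st.2
          (st.1 ++ [row], row))
        ([], List.replicate b.length 0) =
      ((List.range n).map (fun i => (List.range b.length).map (fun j => pvESpec a b i j)),
       if n = 0 then List.replicate b.length 0
       else (List.range b.length).map (fun j => pvESpec a b (n - 1) j)) by
    rw [h a.length le_rfl]
  intro n hn
  induction n with
  | zero => rfl
  | succ m ih =>
    rw [List.range_succ, List.foldl_append, ih (by omega)]
    simp only [List.foldl_cons, List.foldl_nil]
    rw [pvRowB_correct a b m (by omega)]
    simp [List.map_append]

theorem pvTableB_getD (a b : List Int) (i j : Nat) (hi : i < a.length) :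
    ((pvTableB a b).getD i []).getD j 0 = pvESpec a b i j := by
  rw [pvTableB_eq, pvGetD_map_range, if_pos hi, pvGetD_map_range]
  by_cases hj : j < b.length
  · rw [if_pos hj]
  · rw [if_neg hj, pvESpec, if_neg (by tauto)]

-- b2j characterization
theorem pvB2J_getD (b : List Int) (x : Int) :
    (pvB2J b).getD x [] = (List.range b.length).filter (fun j => b.getD j 0 == x) := by
  unfold pvB2J
  suffices h : ∀ n, ∀ x : Int,
      ((List.range n).foldl
        (fun d j => d.insert (b.getD j 0) (d.getD (b.getD j 0) [] ++ [j]))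
        PySem.Dict.empty).getD x [] =
      (List.range n).filter (fun j => b.getD j 0 == x) from h b.length x
  intro n
  induction n with
  | zero => intro x; simp [PySem.Dict.getD_empty]
  | succ m ih =>
    intro x
    rw [List.range_succ, List.foldl_append]
    simp only [List.foldl_cons, List.foldl_nil]
    rw [PySem.Dict.getD_insert, List.filter_append]
    by_cases hx : x = b.getD m 0
    · rw [if_pos hx, ih (b.getD m 0), hx]
      simp
    · rw [if_neg hx, ih x]
      have hne : (b.getD m 0 == x) = false := beq_eq_false_iff_ne.2 (fun h => hx h.symm)
      simp only [List.filter_cons, List.filter_nil, hne, List.append_nil]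
      simp

-- generic fold invariant
theorem pvFoldlInv {α β : Type} (l : List α) (P : β → Prop) (f : β → α → β) (init : β)
    (h0 : P init) (hstep : ∀ acc x, x ∈ l → P acc → P (f acc x)) : P (l.foldl f init) := by
  induction l generalizing init with
  | nil => exact h0
  | cons hd tl ih =>
    exact ih (f init hd) (hstep init hd List.mem_cons_self h0)
      (fun acc x hx hP => hstep acc x (List.mem_cons_of_mem _ hx) hP)

-- proof-layer form of pvLongestB's folds, with pvCellK in place of the table
def pvStepC (a b : List Int) (alo blo i : Nat) (best : Nat × Nat × Nat) (j : Nat) : Nat × Nat × Nat :=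
  if pvCellK a b alo blo i j > best.2.2 then
    (i + 1 - pvCellK a b alo blo i j, j + 1 - pvCellK a b alo blo i j, pvCellK a b alo blo i j)
  else best

def pvRowC (a b : List Int) (alo blo bhi : Nat) (best : Nat × Nat × Nat) (i : Nat) : Nat × Nat × Nat :=
  (List.range' blo (bhi - blo)).foldl (pvStepC a b alo blo i) best

def pvLongestC (a b : List Int) (alo ahi blo bhi : Nat) : Nat × Nat × Nat :=
  (List.range' alo (ahi - alo)).foldl (pvRowC a b alo blo bhi) (alo, blo, 0)

theorem pvCellK_le_eSpec (a b : List Int) (alo blo i j : Nat) :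
    pvCellK a b alo blo i j ≤ pvESpec a b i j :=
  le_trans (Nat.min_le_left _ _) (Nat.min_le_left _ _)

theorem pvCellK_le_mid (a b : List Int) (alo blo i j : Nat) :
    pvCellK a b alo blo i j ≤ i - alo + 1 :=
  le_trans (Nat.min_le_left _ _) (Nat.min_le_right _ _)

theorem pvCellK_le_right (a b : List Int) (alo blo i j : Nat) :
    pvCellK a b alo blo i j ≤ j - blo + 1 :=
  Nat.min_le_right _ _

theorem pvCellK_pos (a b : List Int) (alo blo i j : Nat)
    (h : i < a.length ∧ j < b.length ∧ a.getD i 0 = b.getD j 0) :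
    0 < pvCellK a b alo blo i j := by
  unfold pvCellK
  have := (pvESpec_pos a b i j).2 h
  omega

theorem pvLongestB_eq_C (a b : List Int) (alo ahi blo bhi : Nat)
    (h2 : ahi ≤ a.length) :
    pvLongestB (pvTableB a b) alo ahi blo bhi = pvLongestC a b alo ahi blo bhi := by
  unfold pvLongestB pvLongestC pvRowC pvStepC pvCellK
  apply PySem.List.foldl_congr_mem
  intro best i hi
  apply PySem.List.foldl_congr_mem
  intro best' j hj
  rw [List.mem_range'_1] at hi hj
  rw [pvTableB_getD a b i j (by omega)]

theorem pvStepC_mono (a b : List Int) (alo blo i : Nat) (best : Nat × Nat × Nat) (j : Nat) :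
    best.2.2 ≤ (pvStepC a b alo blo i best j).2.2 := by
  unfold pvStepC
  split_ifs with h
  · exact le_of_lt h
  · exact le_rfl

theorem pvStepC_ge (a b : List Int) (alo blo i : Nat) (best : Nat × Nat × Nat) (j : Nat) :
    pvCellK a b alo blo i j ≤ (pvStepC a b alo blo i best j).2.2 := by
  unfold pvStepC
  split_ifs with h
  · exact le_rfl
  · omega

theorem pvFoldStepC_mono (a b : List Int) (alo blo i : Nat) (l : List Nat) (best : Nat × Nat × Nat) :
    best.2.2 ≤ (l.foldl (pvStepC a b alo blo i) best).2.2 := by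
  induction l generalizing best with
  | nil => exact le_rfl
  | cons hd tl ih => exact le_trans (pvStepC_mono a b alo blo i best hd) (ih _)

theorem pvFoldRowC_mono (a b : List Int) (alo blo bhi : Nat) (l : List Nat) (best : Nat × Nat × Nat) :
    best.2.2 ≤ (l.foldl (pvRowC a b alo blo bhi) best).2.2 := by
  induction l generalizing best with
  | nil => exact le_rfl
  | cons hd tl ih => exact le_trans (pvFoldStepC_mono a b alo blo hd _ _) (ih _)

theorem pvRangeSplit (s n m : Nat) (hm : m ≤ n) :
    List.range' s n = List.range' s m ++ List.range' (s + m) (n - m) := by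
  have h := @List.range'_append s m (n - m) 1
  simp only [Nat.one_mul] at h
  rw [show n = m + (n - m) by omega, ← h,
    show m + (n - m) - m = n - m by omega]

-- the fold's result dominates every in-region cell value
theorem pvLongestC_max (a b : List Int) (alo ahi blo bhi i j : Nat)
    (hi1 : alo ≤ i) (hi2 : i < ahi) (hj1 : blo ≤ j) (hj2 : j < bhi) :
    pvCellK a b alo blo i j ≤ (pvLongestC a b alo ahi blo bhi).2.2 := by
  unfold pvLongestC
  have hsplit : List.range' alo (ahi - alo) =
      List.range' alo (i - alo) ++ i :: List.range' (i + 1) (ahi - i - 1) := by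
    rw [pvRangeSplit alo (ahi - alo) (i - alo) (by omega),
      show alo + (i - alo) = i by omega,
      show (ahi - alo) - (i - alo) = (ahi - i - 1) + 1 by omega,
      List.range'_succ]
  rw [hsplit, List.foldl_append, List.foldl_cons]
  apply le_trans _ (pvFoldRowC_mono a b alo blo bhi _ _)
  unfold pvRowC
  have hsplitj : List.range' blo (bhi - blo) =
      List.range' blo (j - blo) ++ j :: List.range' (j + 1) (bhi - j - 1) := by
    rw [pvRangeSplit blo (bhi - blo) (j - blo) (by omega),
      show blo + (j - blo) = j by omega,
      show (bhi - blo) - (j - blo) = (bhi - j - 1) + 1 by omega,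
      List.range'_succ]
  rw [hsplitj, List.foldl_append, List.foldl_cons]
  exact le_trans (pvStepC_ge a b alo blo i _ j) (pvFoldStepC_mono a b alo blo i _ _)

-- shape predicate: the initial value or an achieved in-region block
def pvShapeP (a b : List Int) (alo ahi blo bhi : Nat) (best : Nat × Nat × Nat) : Prop :=
  best = (alo, blo, 0) ∨
    (∃ ie je, alo ≤ ie ∧ ie < ahi ∧ blo ≤ je ∧ je < bhi ∧
      0 < pvCellK a b alo blo ie je ∧
      best = (ie + 1 - pvCellK a b alo blo ie je, je + 1 - pvCellK a b alo blo ie je,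
        pvCellK a b alo blo ie je))

theorem pvLongestC_shape (a b : List Int) (alo ahi blo bhi : Nat) :
    pvShapeP a b alo ahi blo bhi (pvLongestC a b alo ahi blo bhi) := by
  unfold pvLongestC
  apply pvFoldlInv _ (pvShapeP a b alo ahi blo bhi) _ _ (Or.inl rfl)
  intro acc i hi hP
  rw [List.mem_range'_1] at hi
  unfold pvRowC
  apply pvFoldlInv _ (pvShapeP a b alo ahi blo bhi) _ _ hP
  intro acc' j hj hP'
  rw [List.mem_range'_1] at hj
  unfold pvStepC
  split_ifs with hk
  · right
    exact ⟨i, j, hi.1, by omega, hj.1, by omega, by omega, rfl⟩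
  · exact hP'

-- a degenerate region yields no blocks
theorem pvLongestB_degenerate (E : List (List Nat)) (alo ahi blo bhi : Nat)
    (h : ahi ≤ alo ∨ bhi ≤ blo) : pvLongestB E alo ahi blo bhi = (alo, blo, 0) := by
  unfold pvLongestB
  rcases h with h | h
  · rw [Nat.sub_eq_zero_of_le h]; rfl
  · rw [Nat.sub_eq_zero_of_le h]
    simp
theorem pvRecB_nil (E : List (List Nat)) (fuel alo ahi blo bhi : Nat)
    (h : ahi ≤ alo ∨ bhi ≤ blo) : pvRecB E fuel alo ahi blo bhi = [] := by
  cases fuel with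
  | zero => rfl
  | succ n =>
    rw [pvRecB, pvLongestB_degenerate E alo ahi blo bhi h]
    rfl


-- ---- core: difflib's rolling-dict scan equals the clamped-table argmax ----

-- abstract value of A's j2len dict after n processed rows (rows alo .. alo+n-1)
def pvDF (a b : List Int) (alo blo bhi n : Nat) (z : Int) : Nat :=
  if n = 0 then 0
  else if 0 ≤ z then
    (if blo ≤ z.toNat ∧ z.toNat < bhi ∧ z.toNat < b.length ∧
        b.getD z.toNat 0 = a.getD (alo + n - 1) 0 then
      pvCellK a b alo blo (alo + n - 1) z.toNat
    else 0)
  else 0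

-- reading the previous row's dict at j-1 and adding 1 gives the clamped cell value
theorem pvStepVal (a b : List Int) (alo blo bhi n : Nat) (hla : alo + n < a.length) (j : Nat)
    (hj1 : blo ≤ j) (hj2 : j < bhi) (hjb : j < b.length)
    (hm : b.getD j 0 = a.getD (alo + n) 0) :
    pvDF a b alo blo bhi n ((j : Int) - 1) + 1 = pvCellK a b alo blo (alo + n) j := by
  have hpos : 0 < pvESpec a b (alo + n) j := (pvESpec_pos a b (alo + n) j).2 ⟨hla, hjb, hm.symm⟩
  unfold pvDF pvCellK
  by_cases hn : n = 0
  · rw [if_pos hn]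
    simp only [Nat.min_def]
    split_ifs <;> omega
  · rw [if_neg hn]
    by_cases hj0 : j = 0
    · subst hj0
      rw [if_neg (by norm_num)]
      simp only [Nat.min_def]
      split_ifs <;> omega
    · rw [if_pos (show (0:Int) ≤ (j : Int) - 1 by omega)]
      have hz : ((j : Int) - 1).toNat = j - 1 := by omega
      rw [hz]
      by_cases hmm : blo ≤ j - 1 ∧ j - 1 < bhi ∧ j - 1 < b.length ∧
          b.getD (j - 1) 0 = a.getD (alo + n - 1) 0
      · rw [if_pos hmm]
        obtain ⟨hc1, hc2, hc3, hc4⟩ := hmm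
        have hjblo : blo < j := by omega
        have hsucc : pvESpec a b (alo + n) j = pvESpec a b (alo + n - 1) (j - 1) + 1 := by
          conv_lhs => rw [pvESpec]
          rw [if_pos (show alo + n < a.length ∧ j < b.length ∧
              a.getD (alo + n) 0 = b.getD j 0 from ⟨hla, hjb, hm.symm⟩)]
          rw [if_neg (show ¬(alo + n = 0 ∨ j = 0) by omega)]
        rw [hsucc]
        simp only [Nat.min_def]
        split_ifs <;> omega
      · rw [if_neg hmm]
        by_cases hjblo : j = blo
        · simp only [Nat.min_def]
          split_ifs <;> omega
        · have hz0 : pvESpec a b (alo + n - 1) (j - 1) = 0 := by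
            by_contra hne
            have hp := (pvESpec_pos a b (alo + n - 1) (j - 1)).1 (by omega)
            exact hmm ⟨by omega, by omega, hp.2.1, hp.2.2.symm⟩
          have h1 : pvESpec a b (alo + n) j = 1 := by
            conv_lhs => rw [pvESpec]
            rw [if_pos (show alo + n < a.length ∧ j < b.length ∧
                a.getD (alo + n) 0 = b.getD j 0 from ⟨hla, hjb, hm.symm⟩)]
            rw [if_neg (show ¬(alo + n = 0 ∨ j = 0) by omega)]
            omega
          rw [h1]
          simp only [Nat.min_def]
          split_ifs <;> omega

-- A's inner row loop, characterized: insertions and best updates over the in-range matches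
theorem pvFlmInner_spec (a b : List Int) (alo blo bhi i : Nat) (d : PySem.Dict Int Nat)
    (hstep : ∀ j : Nat, blo ≤ j → j < bhi → j < b.length → b.getD j 0 = a.getD i 0 →
      d.getD ((j : Int) - 1) 0 + 1 = pvCellK a b alo blo i j) :
    ∀ js : List Nat, js.Pairwise (· < ·) →
      (∀ j ∈ js, j < b.length ∧ b.getD j 0 = a.getD i 0) →
      ∀ acc best,
      pvFlmInner d blo bhi i js acc best =
        ((js.filter (fun j => decide (blo ≤ j) && decide (j < bhi))).foldl
            (fun ac j => ac.insert ((j : Int)) (pvCellK a b alo blo i j)) acc,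
         (js.filter (fun j => decide (blo ≤ j) && decide (j < bhi))).foldl
            (pvStepC a b alo blo i) best) := by
  intro js
  induction js with
  | nil => intro _ _ acc best; rfl
  | cons j rest ih =>
    intro hpair hmem acc best
    have hj := hmem j List.mem_cons_self
    rw [pvFlmInner]
    by_cases h1 : j < blo
    · rw [if_pos h1]
      have hf : (decide (blo ≤ j) && decide (j < bhi)) = false := by
        simp [decide_eq_false_iff_not]; omega
      rw [List.filter_cons_of_neg (by simp [hf])]
      exact ih hpair.of_cons (fun x hx => hmem x (List.mem_cons_of_mem _ hx)) acc best
    · rw [if_neg h1]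
      by_cases h2 : bhi ≤ j
      · rw [if_pos h2]
        have hall : (j :: rest).filter (fun j => decide (blo ≤ j) && decide (j < bhi)) = [] := by
          rw [List.filter_eq_nil_iff]
          intro x hx
          rcases List.mem_cons.1 hx with rfl | hx'
          · simp [decide_eq_false_iff_not]; omega
          · have := (List.pairwise_cons.1 hpair).1 x hx'
            simp [decide_eq_false_iff_not]; omega
        rw [hall]
        rfl
      · rw [if_neg h2]
        have hk := hstep j (by omega) (by omega) hj.1 hj.2
        have hkeep : (decide (blo ≤ j) && decide (j < bhi)) = true := by
          simp; omega
        rw [List.filter_cons_of_pos (by simp [hkeep])]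
        simp only [List.foldl_cons]
        rw [hk]
        have hstepC : (if pvCellK a b alo blo i j > best.2.2 then
            (i + 1 - pvCellK a b alo blo i j, j + 1 - pvCellK a b alo blo i j,
              pvCellK a b alo blo i j) else best) = pvStepC a b alo blo i best j := rfl
        rw [hstepC]
        exact ih hpair.of_cons (fun x hx => hmem x (List.mem_cons_of_mem _ hx)) _ _

-- getD of an insertion fold over Nat-cast keys
theorem pvFoldIns_getD (g : Nat → Nat) (l : List Nat) (acc : PySem.Dict Int Nat) (z : Int) :
    (l.foldl (fun ac j => ac.insert (j : Int) (g j)) acc).getD z 0 =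
      if 0 ≤ z ∧ z.toNat ∈ l then g z.toNat else acc.getD z 0 := by
  induction l generalizing acc with
  | nil => simp
  | cons j0 rest ih =>
    simp only [List.foldl_cons]
    rw [ih]
    by_cases hz : 0 ≤ z ∧ z.toNat ∈ rest
    · rw [if_pos hz, if_pos ⟨hz.1, List.mem_cons_of_mem _ hz.2⟩]
    · rw [if_neg hz, PySem.Dict.getD_insert]
      by_cases he : z = (j0 : Int)
      · rw [if_pos he, if_pos ⟨by omega, by rw [he]; simp⟩]
        congr 1
        omega
      · rw [if_neg he, if_neg (by
          intro ⟨hz0, hmem⟩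
          rcases List.mem_cons.1 hmem with h | h
          · exact he (by omega)
          · exact hz ⟨hz0, h⟩)]

-- updates with a zero cell value are skipped
theorem pvFoldStepC_dropzero (a b : List Int) (alo blo i : Nat) (l : List Nat) :
    ∀ best, l.foldl (pvStepC a b alo blo i) best =
      (l.filter (fun j => decide (0 < pvCellK a b alo blo i j))).foldl
        (pvStepC a b alo blo i) best := by
  induction l with
  | nil => intro best; rfl
  | cons j rest ih =>
    intro best
    by_cases h : 0 < pvCellK a b alo blo i j
    · rw [List.filter_cons_of_pos (by simpa using h)]
      simp only [List.foldl_cons]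
      exact ih _
    · rw [List.filter_cons_of_neg (by simpa using h)]
      simp only [List.foldl_cons]
      have hid : pvStepC a b alo blo i best j = best := by
        unfold pvStepC
        rw [if_neg (by omega)]
      rw [hid]
      exact ih best

-- the in-range matches of a full row scan: A's filtered b2j list = B's filtered range
theorem pvRowLists (a b : List Int) (alo blo bhi i : Nat)
    (hi : i < a.length) (h3 : blo ≤ bhi) (h4 : bhi ≤ b.length) :
    ((List.range b.length).filter (fun j => b.getD j 0 == a.getD i 0)).filter
        (fun j => decide (blo ≤ j) && decide (j < bhi)) =
      (List.range' blo (bhi - blo)).filter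
        (fun j => decide (0 < pvCellK a b alo blo i j)) := by
  rw [List.filter_filter]
  have hsplit : List.range b.length =
      List.range' 0 blo ++ List.range' blo (bhi - blo) ++ List.range' bhi (b.length - bhi) := by
    rw [List.range_eq_range', pvRangeSplit 0 b.length blo (by omega)]
    simp only [Nat.zero_add]
    rw [pvRangeSplit blo (b.length - blo) (bhi - blo) (by omega),
      show blo + (bhi - blo) = bhi by omega,
      show b.length - blo - (bhi - blo) = b.length - bhi by omega, List.append_assoc]
  rw [hsplit, List.filter_append, List.filter_append]
  have hnil1 : (List.range' 0 blo).filter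
      (fun j => (decide (blo ≤ j) && decide (j < bhi)) && (b.getD j 0 == a.getD i 0)) = [] := by
    rw [List.filter_eq_nil_iff]
    intro x hx
    rw [List.mem_range'_1] at hx
    simp [decide_eq_false_iff_not]
    omega
  have hnil2 : (List.range' bhi (b.length - bhi)).filter
      (fun j => (decide (blo ≤ j) && decide (j < bhi)) && (b.getD j 0 == a.getD i 0)) = [] := by
    rw [List.filter_eq_nil_iff]
    intro x hx
    rw [List.mem_range'_1] at hx
    simp [decide_eq_false_iff_not]
    omega
  rw [hnil1, hnil2, List.nil_append, List.append_nil]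
  apply List.filter_congr
  intro j hj
  rw [List.mem_range'_1] at hj
  have hjlt : j < bhi := by omega
  have hiff : (0 < pvCellK a b alo blo i j) ↔ (b.getD j 0 = a.getD i 0) := by
    constructor
    · intro h
      have h0 : 0 < pvESpec a b i j := by
        have := pvCellK_le_eSpec a b alo blo i j
        omega
      exact ((pvESpec_pos a b i j).1 h0).2.2.symm
    · intro h
      exact pvCellK_pos a b alo blo i j ⟨hi, by omega, h.symm⟩
  by_cases hp : b.getD j 0 = a.getD i 0
  · have hpos0 := hiff.2 hp
    simp only [List.getD_eq_getElem?_getD] at hp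
    simp [hp, hpos0, hj.1, hjlt]
  · have hnp : ¬(0 < pvCellK a b alo blo i j) := fun hc => hp (hiff.1 hc)
    simp only [List.getD_eq_getElem?_getD] at hp
    simp [hp, hnp]

-- outer induction over rows: dict abstraction + best agreement
theorem pvRows_spec (a b : List Int) (alo ahi blo bhi : Nat)
    (h2 : ahi ≤ a.length) (h3 : blo ≤ bhi) (h4 : bhi ≤ b.length) :
    ∀ n, n ≤ ahi - alo →
      (∀ z : Int,
        ((List.range' alo n).foldl
          (fun (st : PySem.Dict Int Nat × (Nat × Nat × Nat)) i =>
            pvFlmInner st.1 blo bhi i ((pvB2J b).getD (a.getD i 0) []) PySem.Dict.empty st.2)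
          (PySem.Dict.empty, (alo, blo, 0))).1.getD z 0 = pvDF a b alo blo bhi n z) ∧
      ((List.range' alo n).foldl
          (fun (st : PySem.Dict Int Nat × (Nat × Nat × Nat)) i =>
            pvFlmInner st.1 blo bhi i ((pvB2J b).getD (a.getD i 0) []) PySem.Dict.empty st.2)
          (PySem.Dict.empty, (alo, blo, 0))).2 =
        (List.range' alo n).foldl (pvRowC a b alo blo bhi) (alo, blo, 0) := by
  intro n
  induction n with
  | zero =>
    intro _
    exact ⟨fun z => by simp [pvDF], rfl⟩
  | succ m ih =>
    intro hm
    obtain ⟨ihd, ihb⟩ := ih (by omega)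
    have hconcat : List.range' alo (m + 1) = List.range' alo m ++ [alo + m] := by
      have h := @List.range'_append alo m 1 1
      simp only [Nat.one_mul, List.range'_one] at h
      rw [← h]
    rw [hconcat, List.foldl_append, List.foldl_append]
    simp only [List.foldl_cons, List.foldl_nil]
    have hila : alo + m < a.length := by omega
    have hstep : ∀ j : Nat, blo ≤ j → j < bhi → j < b.length →
        b.getD j 0 = a.getD (alo + m) 0 →
        (((List.range' alo m).foldl
          (fun (st : PySem.Dict Int Nat × (Nat × Nat × Nat)) i =>
            pvFlmInner st.1 blo bhi i ((pvB2J b).getD (a.getD i 0) []) PySem.Dict.empty st.2)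
          (PySem.Dict.empty, (alo, blo, 0))).1).getD ((j : Int) - 1) 0 + 1 =
          pvCellK a b alo blo (alo + m) j := by
      intro j hj1 hj2 hjb hmm
      rw [ihd]
      exact pvStepVal a b alo blo bhi m hila j hj1 hj2 hjb hmm
    have hjs := pvB2J_getD b (a.getD (alo + m) 0)
    have hpair : ((List.range b.length).filter
        (fun j => b.getD j 0 == a.getD (alo + m) 0)).Pairwise (· < ·) :=
      (List.pairwise_lt_range).filter _
    have hmem : ∀ j ∈ (List.range b.length).filter
        (fun j => b.getD j 0 == a.getD (alo + m) 0),
        j < b.length ∧ b.getD j 0 = a.getD (alo + m) 0 := by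
      intro j hjmem
      rw [List.mem_filter, List.mem_range] at hjmem
      exact ⟨hjmem.1, by simpa using hjmem.2⟩
    rw [hjs]
    rw [pvFlmInner_spec a b alo blo bhi (alo + m) _ hstep _ hpair hmem PySem.Dict.empty _]
    constructor
    · intro z
      rw [pvFoldIns_getD]
      unfold pvDF
      rw [show alo + (m + 1) - 1 = alo + m by omega]
      by_cases hz : 0 ≤ z
      · by_cases hin : z.toNat ∈ ((List.range b.length).filter
            (fun j => b.getD j 0 == a.getD (alo + m) 0)).filter
            (fun j => decide (blo ≤ j) && decide (j < bhi))
        · have hprops : blo ≤ z.toNat ∧ z.toNat < bhi ∧ z.toNat < b.length ∧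
              b.getD z.toNat 0 = a.getD (alo + m) 0 := by
            rw [List.mem_filter, List.mem_filter, List.mem_range] at hin
            obtain ⟨⟨hr, hbeq⟩, hrange⟩ := hin
            simp only [Bool.and_eq_true, decide_eq_true_eq] at hrange
            exact ⟨hrange.1, hrange.2, hr, beq_iff_eq.1 hbeq⟩
          have h1 : (0:Int) ≤ z ∧ z.toNat ∈ ((List.range b.length).filter
              (fun j => b.getD j 0 == a.getD (alo + m) 0)).filter
              (fun j => decide (blo ≤ j) && decide (j < bhi)) := ⟨hz, hin⟩
          rw [if_pos h1, if_neg (show ¬(m + 1 = 0) by omega), if_pos hz, if_pos hprops]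
        · have h1 : ¬((0:Int) ≤ z ∧ z.toNat ∈ ((List.range b.length).filter
              (fun j => b.getD j 0 == a.getD (alo + m) 0)).filter
              (fun j => decide (blo ≤ j) && decide (j < bhi))) := fun hcc => hin hcc.2
          rw [if_neg h1, if_neg (show ¬(m + 1 = 0) by omega), if_pos hz]
          have hnc : ¬(blo ≤ z.toNat ∧ z.toNat < bhi ∧ z.toNat < b.length ∧
              b.getD z.toNat 0 = a.getD (alo + m) 0) := by
            rintro ⟨hc1, hc2, hc3, hc4⟩
            apply hin
            rw [List.mem_filter, List.mem_filter, List.mem_range]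
            refine ⟨⟨hc3, beq_iff_eq.2 hc4⟩, ?_⟩
            simp only [Bool.and_eq_true, decide_eq_true_eq]
            omega
          rw [if_neg hnc]
          simp
      · have h1 : ¬((0:Int) ≤ z ∧ z.toNat ∈ ((List.range b.length).filter
            (fun j => b.getD j 0 == a.getD (alo + m) 0)).filter
            (fun j => decide (blo ≤ j) && decide (j < bhi))) := fun hcc => hz hcc.1
        rw [if_neg h1, if_neg (show ¬(m + 1 = 0) by omega), if_neg hz]
        simp
    · rw [ihb, pvRowLists a b alo blo bhi (alo + m) hila h3 h4]
      unfold pvRowC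
      rw [← pvFoldStepC_dropzero]

-- first-step failure makes the left extension a no-op (at any fuel)
theorem pvExtLeft_id (a b : List Int) (alo blo : Nat) (best : Nat × Nat × Nat)
    (h : ¬(alo < best.1 ∧ blo < best.2.1 ∧ a.getD (best.1 - 1) 0 = b.getD (best.2.1 - 1) 0)) :
    ∀ fuel, pvExtLeft a b alo blo fuel best = best := by
  intro fuel
  obtain ⟨bi, bj, bk⟩ := best
  cases fuel with
  | zero => rfl
  | succ n =>
    rw [pvExtLeft, if_neg h]

theorem pvExtRight_id (a b : List Int) (ahi bhi : Nat) (best : Nat × Nat × Nat)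
    (h : ¬(best.1 + best.2.2 < ahi ∧ best.2.1 + best.2.2 < bhi ∧
      a.getD (best.1 + best.2.2) 0 = b.getD (best.2.1 + best.2.2) 0)) :
    ∀ fuel, pvExtRight a b ahi bhi fuel best = best := by
  intro fuel
  obtain ⟨bi, bj, bk⟩ := best
  cases fuel with
  | zero => rfl
  | succ n =>
    rw [pvExtRight, if_neg h]

-- the found best cannot extend left
theorem pvLongestC_noextL (a b : List Int) (alo ahi blo bhi : Nat)
    (h2 : ahi ≤ a.length) (h4 : bhi ≤ b.length) :
    ¬(alo < (pvLongestC a b alo ahi blo bhi).1 ∧ blo < (pvLongestC a b alo ahi blo bhi).2.1 ∧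
      a.getD ((pvLongestC a b alo ahi blo bhi).1 - 1) 0 =
        b.getD ((pvLongestC a b alo ahi blo bhi).2.1 - 1) 0) := by
  rcases pvLongestC_shape a b alo ahi blo bhi with h | ⟨ie, je, hi1, hi2, hj1, hj2, hk, he⟩
  · rw [h]
    intro ⟨hc, _⟩
    omega
  · rw [he]
    intro ⟨hc1, hc2, hc3⟩
    simp only at hc1 hc2 hc3
    set k := pvCellK a b alo blo ie je with hkdef
    have hle : k ≤ pvESpec a b ie je := pvCellK_le_eSpec a b alo blo ie je
    have hm1 : k ≤ ie - alo + 1 := pvCellK_le_mid a b alo blo ie je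
    have hm2 : k ≤ je - blo + 1 := pvCellK_le_right a b alo blo ie je
    have hkE : pvESpec a b ie je = k := by
      unfold pvCellK at hkdef
      omega
    have hmis := pvESpec_mismatch a b ie je k hkE (by omega) (by omega) (by omega)
    apply hmis
    have e1 : ie + 1 - k - 1 = ie - k := by omega
    have e2 : je + 1 - k - 1 = je - k := by omega
    rw [e1, e2] at hc3
    exact hc3

-- the found best cannot extend right
theorem pvLongestC_noextR (a b : List Int) (alo ahi blo bhi : Nat)
    (h2 : ahi ≤ a.length) (h4 : bhi ≤ b.length) :
    ¬((pvLongestC a b alo ahi blo bhi).1 + (pvLongestC a b alo ahi blo bhi).2.2 < ahi ∧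
      (pvLongestC a b alo ahi blo bhi).2.1 + (pvLongestC a b alo ahi blo bhi).2.2 < bhi ∧
      a.getD ((pvLongestC a b alo ahi blo bhi).1 + (pvLongestC a b alo ahi blo bhi).2.2) 0 =
        b.getD ((pvLongestC a b alo ahi blo bhi).2.1 + (pvLongestC a b alo ahi blo bhi).2.2) 0) := by
  rcases pvLongestC_shape a b alo ahi blo bhi with h | ⟨ie, je, hi1, hi2, hj1, hj2, hk, he⟩
  · rw [h]
    intro ⟨hc1, hc2, hc3⟩
    simp only at hc1 hc2 hc3
    have hcell : 0 < pvCellK a b alo blo alo blo :=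
      pvCellK_pos a b alo blo alo blo ⟨by omega, by omega, by simpa using hc3⟩
    have hmax := pvLongestC_max a b alo ahi blo bhi alo blo le_rfl (by omega) le_rfl (by omega)
    rw [h] at hmax
    simp at hmax
    omega
  · rw [he]
    intro ⟨hc1, hc2, hc3⟩
    simp only at hc1 hc2 hc3
    set k := pvCellK a b alo blo ie je with hkdef
    have hle : k ≤ pvESpec a b ie je := pvCellK_le_eSpec a b alo blo ie je
    have hm1 : k ≤ ie - alo + 1 := pvCellK_le_mid a b alo blo ie je
    have hm2 : k ≤ je - blo + 1 := pvCellK_le_right a b alo blo ie je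
    have e1 : ie + 1 - k + k = ie + 1 := by omega
    have e2 : je + 1 - k + k = je + 1 := by omega
    rw [e1] at hc1 hc3
    rw [e2] at hc2 hc3
    have hE1 : pvESpec a b (ie + 1) (je + 1) = pvESpec a b ie je + 1 := by
      rw [pvESpec, if_pos ⟨by omega, by omega, hc3⟩, if_neg (by omega)]
      norm_num
    have hcell : k + 1 ≤ pvCellK a b alo blo (ie + 1) (je + 1) := by
      unfold pvCellK
      rw [hE1]
      omega
    have hmax := pvLongestC_max a b alo ahi blo bhi (ie + 1) (je + 1)
      (by omega) (by omega) (by omega) (by omega)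
    rw [he] at hmax
    simp only at hmax
    omega

-- the two find-longest computations agree on every valid region
theorem pvFindLongest_eq (a b : List Int) (alo ahi blo bhi : Nat)
    (h1 : alo ≤ ahi) (h2 : ahi ≤ a.length) (h3 : blo ≤ bhi) (h4 : bhi ≤ b.length) :
    pvFindLongestMatch a b (pvB2J b) alo ahi blo bhi = pvLongestB (pvTableB a b) alo ahi blo bhi := by
  dsimp only [pvFindLongestMatch]
  have hrows := (pvRows_spec a b alo ahi blo bhi h2 h3 h4 (ahi - alo) le_rfl).2
  rw [hrows]
  have hC : (List.range' alo (ahi - alo)).foldl (pvRowC a b alo blo bhi) (alo, blo, 0) =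
      pvLongestC a b alo ahi blo bhi := rfl
  rw [hC]
  rw [pvExtLeft_id a b alo blo _ (pvLongestC_noextL a b alo ahi blo bhi h2 h4) _]
  rw [pvExtRight_id a b ahi bhi _ (pvLongestC_noextR a b alo ahi blo bhi h2 h4) _]
  exact (pvLongestB_eq_C a b alo ahi blo bhi h2).symm

-- bounds of a nonzero result block
theorem pvLongestB_bounds (a b : List Int) (alo ahi blo bhi : Nat) (h2 : ahi ≤ a.length)
    (hne : (pvLongestB (pvTableB a b) alo ahi blo bhi).2.2 ≠ 0) :
    alo ≤ (pvLongestB (pvTableB a b) alo ahi blo bhi).1 ∧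
    (pvLongestB (pvTableB a b) alo ahi blo bhi).1 + (pvLongestB (pvTableB a b) alo ahi blo bhi).2.2 ≤ ahi ∧
    blo ≤ (pvLongestB (pvTableB a b) alo ahi blo bhi).2.1 ∧
    (pvLongestB (pvTableB a b) alo ahi blo bhi).2.1 + (pvLongestB (pvTableB a b) alo ahi blo bhi).2.2 ≤ bhi := by
  rw [pvLongestB_eq_C a b alo ahi blo bhi h2] at hne ⊢
  rcases pvLongestC_shape a b alo ahi blo bhi with h | ⟨ie, je, hi1, hi2, hj1, hj2, hk, he⟩
  · rw [h] at hne; simp at hne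
  · have hm := pvCellK_le_mid a b alo blo ie je
    have hr := pvCellK_le_right a b alo blo ie je
    rw [he]
    refine ⟨?_, ?_, ?_, ?_⟩
    · show alo ≤ ie + 1 - pvCellK a b alo blo ie je
      omega
    · show (ie + 1 - pvCellK a b alo blo ie je) + pvCellK a b alo blo ie je ≤ ahi
      omega
    · show blo ≤ je + 1 - pvCellK a b alo blo ie je
      omega
    · show (je + 1 - pvCellK a b alo blo ie je) + pvCellK a b alo blo ie je ≤ bhi
      omega

-- the guarded difflib recursion equals B's unconditional recursion
theorem pvMBGo_eq (a b : List Int) (fuel : Nat) :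
    ∀ (alo ahi blo bhi : Nat), alo ≤ ahi → ahi ≤ a.length → blo ≤ bhi → bhi ≤ b.length →
    pvMBGo a b (pvB2J b) fuel alo ahi blo bhi = pvRecB (pvTableB a b) fuel alo ahi blo bhi := by
  induction fuel with
  | zero => intro _ _ _ _ _ _ _ _; rfl
  | succ n ih =>
    intro alo ahi blo bhi h1 h2 h3 h4
    rw [pvMBGo, pvRecB, pvFindLongest_eq a b alo ahi blo bhi h1 h2 h3 h4]
    set m := pvLongestB (pvTableB a b) alo ahi blo bhi with hm
    by_cases hz : m.2.2 = 0
    · rw [if_pos hz, if_pos hz]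
    · rw [if_neg hz, if_neg hz]
      obtain ⟨hb1, hb2, hb3, hb4⟩ := pvLongestB_bounds a b alo ahi blo bhi h2 hz
      rw [← hm] at hb1 hb2 hb3 hb4
      congr 1
      · by_cases g1 : alo < m.1 ∧ blo < m.2.1
        · rw [if_pos g1]
          exact ih alo m.1 blo m.2.1 (by omega) (by omega) (by omega) (by omega)
        · rw [if_neg g1]
          rcases not_and_or.1 g1 with g | g
          · exact (pvRecB_nil _ _ _ _ _ _ (Or.inl (by omega))).symm
          · exact (pvRecB_nil _ _ _ _ _ _ (Or.inr (by omega))).symm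
      · congr 1
        by_cases g2 : m.1 + m.2.2 < ahi ∧ m.2.1 + m.2.2 < bhi
        · rw [if_pos g2]
          exact ih (m.1 + m.2.2) ahi (m.2.1 + m.2.2) bhi (by omega) h2 (by omega) h4
        · rw [if_neg g2]
          rcases not_and_or.1 g2 with g | g
          · exact (pvRecB_nil _ _ _ _ _ _ (Or.inl (by omega))).symm
          · exact (pvRecB_nil _ _ _ _ _ _ (Or.inr (by omega))).symm

-- every emitted block has nonzero size
theorem pvRecB_sizes (E : List (List Nat)) (fuel : Nat) :
    ∀ (alo ahi blo bhi : Nat), ∀ m ∈ pvRecB E fuel alo ahi blo bhi, m.2.2 ≠ 0 := by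
  induction fuel with
  | zero => intro _ _ _ _ m hm; simp [pvRecB] at hm
  | succ n ih =>
    intro alo ahi blo bhi m hm
    rw [pvRecB] at hm
    split_ifs at hm with h
    · simp at hm
    · simp only [List.mem_append, List.mem_cons] at hm
      rcases hm with hm | hm | hm
      · exact ih _ _ _ _ m hm
      · subst hm; exact h
      · exact ih _ _ _ _ m hm

-- collapse with a pending triple = merge with a cur-accumulator
theorem pvCollapse_eq_merge_aux (xs : List (Nat × Nat × Nat)) :
    ∀ (c : Nat × Nat × Nat), c.2.2 ≠ 0 → (∀ m ∈ xs, m.2.2 ≠ 0) →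
      pvCollapse xs c = pvMergeB xs (some c) := by
  induction xs with
  | nil => intro ⟨i1, j1, k1⟩ hc _; simp [pvCollapse, pvMergeB, hc]
  | cons blk rest ih =>
    intro ⟨i1, j1, k1⟩ hc hall
    obtain ⟨i2, j2, k2⟩ := blk
    rw [pvCollapse, pvMergeB]
    split_ifs with h
    · exact ih (i1, j1, k1 + k2) (by simp at hc ⊢; omega) (fun m hm => hall m (List.mem_cons_of_mem _ hm))
    · rw [ih (i2, j2, k2) (hall _ (List.mem_cons_self)) (fun m hm => hall m (List.mem_cons_of_mem _ hm))]

theorem pvCollapse_eq_merge (xs : List (Nat × Nat × Nat)) (hs : ∀ m ∈ xs, m.2.2 ≠ 0) :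
    pvCollapse xs (0, 0, 0) = pvMergeB xs none := by
  cases xs with
  | nil => rfl
  | cons blk rest =>
    obtain ⟨i2, j2, k2⟩ := blk
    have hrest : ∀ m ∈ rest, m.2.2 ≠ 0 := fun m hm => hs m (List.mem_cons_of_mem _ hm)
    have hk2 : k2 ≠ 0 := hs (i2, j2, k2) List.mem_cons_self
    rw [pvCollapse, pvMergeB]
    split_ifs with h h2
    · simp only [Nat.add_zero, Nat.zero_add] at h
      obtain ⟨h1, h2'⟩ := h
      subst h1; subst h2'
      simpa using pvCollapse_eq_merge_aux rest (0, 0, 0 + k2) (by simpa using hk2) hrest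
    · exact absurd rfl h2
    · exact pvCollapse_eq_merge_aux rest (i2, j2, k2) hk2 hrest

-- the matcher pipelines agree
theorem pvBlocks_eq (a b : List Int) :
    pvMatchingBlocks a b =
      pvMergeB (pvRecB (pvTableB a b) (a.length + b.length + 1) 0 a.length 0 b.length) none
        ++ [(a.length, b.length, 0)] := by
  unfold pvMatchingBlocks
  rw [pvMBGo_eq a b (a.length + b.length + 1) 0 a.length 0 b.length
    (Nat.zero_le _) le_rfl (Nat.zero_le _) le_rfl]
  rw [pvCollapse_eq_merge _ (pvRecB_sizes (pvTableB a b) (a.length + b.length + 1) 0 a.length 0 b.length)]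

theorem pvAEmit_append (reference alternative : List Int) (undo_token_id : Int)
    (xs ys : List (String × Nat × Nat × Nat × Nat)) (st : List Int × List Int) :
    pvAEmit reference alternative undo_token_id (xs ++ ys) st =
      pvAEmit reference alternative undo_token_id ys
        (pvAEmit reference alternative undo_token_id xs st) := by
  induction xs generalizing st with
  | nil => simp [pvAEmit]
  | cons hd tl ih =>
    obtain ⟨tag, i1, i2, j1, j2⟩ := hd
    obtain ⟨aug, mask⟩ := st
    simp only [List.cons_append, pvAEmit]
    split_ifs <;> apply ih

theorem pvSlice_empty_of_le (xs : List Int) (a b : Nat) (h : b ≤ a) :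
    PySem.List.slice xs (some (a : Int)) (some (b : Int)) = [] := by
  rw [PySem.List.slice_natCast]
  simp [Nat.sub_eq_zero_of_le h]

-- A's fold over the derived opcodes equals the flattened pieces
theorem pvEmit_eq (reference alternative : List Int) (undo_token_id : Int)
    (bl : List (Nat × Nat × Nat)) (pi pj : Nat) (st : List Int × List Int) :
    pvAEmit reference alternative undo_token_id (pvOpcodes bl pi pj) st =
      (st.1 ++ (pvPieces reference alternative undo_token_id bl pi pj).flatMap (fun p => p.1),
       st.2 ++ (pvPieces reference alternative undo_token_id bl pi pj).flatMap
         (fun p => p.1.map (fun _ => p.2))) := by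
  induction bl generalizing pi pj st with
  | nil => simp [pvOpcodes, pvPieces, pvAEmit]
  | cons hd tl ih =>
    obtain ⟨ai, bj, size⟩ := hd
    obtain ⟨aug, mask⟩ := st
    rw [pvOpcodes, pvAEmit_append, pvAEmit_append, ih, pvPieces]
    have hops : ∀ st' : List Int × List Int,
        pvAEmit reference alternative undo_token_id
          (if size ≠ 0 then [("equal", ai, ai + size, bj, bj + size)] else []) st' =
        (st'.1 ++ PySem.List.slice reference (some (ai : Int)) (some ((ai + size : Nat) : Int)),
         st'.2 ++ List.replicate (PySem.List.slice reference (some (ai : Int)) (some ((ai + size : Nat) : Int))).length 1) := by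
      intro st'
      by_cases h3 : size = 0
      · subst h3
        rw [pvSlice_empty_of_le reference ai (ai + 0) (by omega)]
        simp [pvAEmit]
      · simp [h3, pvAEmit]
    rw [hops]
    by_cases h1 : pi < ai <;> by_cases h2 : pj < bj
    · simp only [h1, h2, and_self, if_pos]
      simp only [pvAEmit, String.reduceEq, if_false]
      split_ifs with hb hc hd he hf <;>
        simp_all [-List.replicate_append_replicate, List.length_eq_zero_iff,
          List.length_pos_iff, List.replicate_add, List.append_assoc, List.flatMap_cons]
    · have hea : PySem.List.slice alternative (some (pj : Int)) (some (bj : Int)) = [] :=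
        pvSlice_empty_of_le alternative pj bj (by omega)
      rw [if_neg (by tauto), if_pos h1]
      simp only [pvAEmit, String.reduceEq, if_false]
      split_ifs with hb hc hd <;>
        simp_all [-List.replicate_append_replicate, List.length_eq_zero_iff,
          List.length_pos_iff, List.replicate_add, List.append_assoc, List.flatMap_cons]
    · have her : PySem.List.slice reference (some (pi : Int)) (some (ai : Int)) = [] :=
        pvSlice_empty_of_le reference pi ai (by omega)
      rw [if_neg (by tauto), if_neg (by omega), if_pos h2]
      simp only [pvAEmit, String.reduceEq, if_false]
      split_ifs with hb hc hd <;>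
        simp_all [-List.replicate_append_replicate, List.length_eq_zero_iff,
          List.length_pos_iff, List.replicate_add, List.append_assoc, List.flatMap_cons]
    · rw [if_neg (by tauto), if_neg (by omega), if_neg (by omega)]
      rw [pvSlice_empty_of_le alternative pj bj (by omega),
          pvSlice_empty_of_le reference pi ai (by omega)]
      simp [pvAEmit]

-- ===== VERDICT (by name: the statement is the Claim_ definition above) =====
theorem hard_sample_augment_spec : Claim_equal_hard_sample_augment := by
  intro reference alternative undo_token_id _
  unfold Spec_hard_sample_augment hard_sample_augment hard_sample_augment_alt
  rw [pvBlocks_eq]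
  exact pvEmit_eq reference alternative undo_token_id _ 0 0 ([], [])
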